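-- pv_equiv track=rewrite | github.com/Bryce-3D/My-Codeforces-Codes | Python/0001-0100/CF_1B.py | convert
-- ===== SOURCE A (Python) =====
-- def type_check(cell_name):
--     if cell_name[0] != 'R':
--         return 1
--     elif cell_name[1].isalpha():
--         return 1
--     elif 'C' not in cell_name:
--         return 1
--     else:
--         return 2
--
-- def num_to_let(num):
--     num = int(num)
--     let = ''
--     length = 1
--
--     #finding the length and subtracting shorter lengths
--     while num > 26**length:
--         num -= 26**length
--         length += 1
--
--     #converting the remaining number to letters
--     num -= 1
--     for i in range(length):
--         let = chr( num%26 + ord('A') ) + let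
--         num = num//26
--
--     return let
--
-- def convert(cell_name):
--     n = len(cell_name)
--
--     #A1 to R1C1
--     if type_check(cell_name) == 1:
--         #finding the division between letters and numbers
--         d = 0
--         check = 0
--         while check == 0:
--             if cell_name[d].isalpha():
--                 d += 1
--             else:
--                 check = 1
--
--         #getting the row number
--         row = ''
--         for i in range(d,n):
--             row = row+cell_name[i]
--
--         #getting the column number
--         col = (26**d-26)//25
--         for i in range(d):
--             col += ( ord(cell_name[i]) - ord('A') )*26**(d-1-i)
--         col += 1
--         col = str(col)
--
--         #putting it together
--         return('R'+row+'C'+col)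
--
--     #R1C1 to A1
--     else:
--         #finding where C is
--         C_place = 2
--         while cell_name[C_place] != 'C':
--             C_place += 1
--
--         #getting the column number
--         col = ''
--         for i in range(C_place+1,n):
--             col += cell_name[i]
--         col = num_to_let(col)
--
--         #getting the row number
--         row = ''
--         for i in range(1,C_place):
--             row += cell_name[i]
--
--         #putting it together
--         return(col+row)
-- ===== SOURCE B (Python) =====
-- def convert(cell_name):
--     if cell_name[0] == 'R' and not cell_name[1].isalpha() and 'C' in cell_name:
--         # RxCy -> A1: bijective base-26 decode by repeated modulo (emits at least one letter)
--         c = cell_name.find('C')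
--         num = int(cell_name[c + 1:])
--         letters = ''
--         while True:
--             num -= 1
--             letters = chr(num % 26 + ord('A')) + letters
--             num //= 26
--             if num <= 0:
--                 break
--         return letters + cell_name[1:c]
--     # A1 -> RxCy: scan off the letter prefix, then Horner accumulation for the column number
--     d = 0
--     while cell_name[d].isalpha():
--         d += 1
--     col = 0
--     for ch in cell_name[:d]:
--         col = col * 26 + ord(ch) - ord('A') + 1
--     return 'R' + cell_name[d:] + 'C' + str(col)
-- ===== Notes on version B (the rewrite author's own statement) =====
-- stated objective: simpler
-- what changed: A1->RxCy computes the column by Horner accumulation (col = col*26 + ord(c)-64) over the letter prefix instead of A's (26**d-26)//25 geometric base plus a power-series loop, and RxCy->A1 decodes the column with a single do-while repeated-modulo loop instead of A's two-phase num_to_let (length search by subtracting powers, then a digit loop).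
import Mathlib
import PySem

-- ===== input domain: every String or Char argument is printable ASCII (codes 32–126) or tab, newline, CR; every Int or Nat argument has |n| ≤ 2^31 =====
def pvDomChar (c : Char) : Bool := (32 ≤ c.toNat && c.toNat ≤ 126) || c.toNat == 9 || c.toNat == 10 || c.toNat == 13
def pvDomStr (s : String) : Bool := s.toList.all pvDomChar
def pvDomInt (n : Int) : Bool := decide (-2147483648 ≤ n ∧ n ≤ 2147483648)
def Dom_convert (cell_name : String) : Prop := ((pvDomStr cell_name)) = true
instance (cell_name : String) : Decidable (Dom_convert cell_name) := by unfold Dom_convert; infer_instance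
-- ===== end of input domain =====

-- B converts A1->RxCy with a Horner column accumulation and RxCy->A1 with a single
-- do-while repeated-modulo decode, replacing A's power-series formula and two-phase num_to_let.

-- ===== PORT A =====

-- type_check(cell_name)
def typeCheckA (l : List Char) : Int :=
  if PySem.List.pyGetD l 0 ' ' ≠ 'R' then 1
  else if PySem.Chars.isalpha (PySem.List.pyGetD l 1 ' ') then 1
  else if ¬ (PySem.Chars.isIn ['C'] l = true) then 1
  else 2

-- the 'while check == 0' scan for the first non-alphabetic character
-- (the d < l.length guard only makes the recursion total: Python raises IndexError past
-- the end, and Pre_convert excludes those inputs)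
def findSplitA : Nat → List Char → Nat → Nat
  | 0, _, d => d
  | fuel + 1, l, d =>
    if h : d < l.length then
      (if PySem.Chars.isalpha l[d] then findSplitA fuel l (d + 1) else d)
    else d

-- the 'while cell_name[C_place] != 'C'' scan (same style of totality guard)
def findCA : Nat → List Char → Nat → Nat
  | 0, _, i => i
  | fuel + 1, l, i =>
    if h : i < l.length then
      (if l[i] ≠ 'C' then findCA fuel l (i + 1) else i)
    else i

-- num_to_let: 'while num > 26**length' phase
def numToLetPhase1 : Nat → Int → Nat → Int × Nat
  | 0, num, len => (num, len)
  | fuel + 1, num, len =>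
    if num > 26 ^ len then numToLetPhase1 fuel (num - 26 ^ len) (len + 1) else (num, len)

-- num_to_let: 'for i in range(length)' phase
def numToLetPhase2 : Nat → Int → List Char → List Char
  | 0, _, acc => acc
  | k + 1, num, acc =>
      numToLetPhase2 k (PySem.Int.floordiv num 26)
        (Char.ofNat (PySem.Int.mod num 26 + 65).toNat :: acc)

def numToLetCore (num : Int) : List Char :=
  numToLetPhase2 (numToLetPhase1 (num.toNat + 1) num 1).2
    ((numToLetPhase1 (num.toNat + 1) num 1).1 - 1) []

-- num_to_let(num) applied to the column-digit string (num = int(num) first)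
def numToLetA (s : List Char) : List Char :=
  match PySem.Int.ofChars? s with
  | none => []   -- Python raises ValueError here; Pre_convert excludes these inputs
  | some num => numToLetCore num

def convertCharsA (l : List Char) : List Char :=
  let n := l.length
  if typeCheckA l = 1 then
    let d := findSplitA (l.length + 1) l 0
    let row := (PySem.List.pyRange (↑d) (↑n) 1).foldl
      (fun acc i => acc ++ [PySem.List.pyGetD l i ' ']) []
    let col0 : Int := PySem.Int.floordiv (26 ^ d - 26) 25
    let col1 := (PySem.List.pyRange 0 (↑d) 1).foldl
      (fun acc i => acc + (((PySem.List.pyGetD l i ' ').toNat : Int) - 65) * 26 ^ (d - 1 - i.toNat)) col0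
    let col := col1 + 1
    'R' :: row ++ 'C' :: PySem.Int.toChars col
  else
    let cPlace := findCA (l.length + 1) l 2
    let colChars := (PySem.List.pyRange (↑(cPlace + 1)) (↑n) 1).foldl
      (fun acc i => acc ++ [PySem.List.pyGetD l i ' ']) []
    let colLet := numToLetA colChars
    let row := (PySem.List.pyRange 1 (↑cPlace) 1).foldl
      (fun acc i => acc ++ [PySem.List.pyGetD l i ' ']) []
    colLet ++ row

def convert (cell_name : String) : String :=
  String.ofList (convertCharsA cell_name.toList)

-- ===== PORT B =====

-- the do-while repeated-modulo decode (emits at least one letter)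
def decodeB : Nat → Int → List Char
  | 0, num => [Char.ofNat (PySem.Int.mod (num - 1) 26 + 65).toNat]
  | fuel + 1, num =>
    let m := num - 1
    let c := Char.ofNat (PySem.Int.mod m 26 + 65).toNat
    if 0 < PySem.Int.floordiv m 26 then decodeB fuel (PySem.Int.floordiv m 26) ++ [c] else [c]

-- B's 'while cell_name[d].isalpha(): d += 1' scan, transliterated as structural recursion
-- on the suffix starting at d (the [] case is where Python raises IndexError scanning past
-- the end; Pre_convert excludes those inputs)
def findSplitB : List Char → Nat → Nat
  | [], d => d
  | c :: t, d => if PySem.Chars.isalpha c then findSplitB t (d + 1) else d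

def convertCharsB (l : List Char) : List Char :=
  if PySem.List.pyGetD l 0 ' ' = 'R' ∧ ¬ (PySem.Chars.isalpha (PySem.List.pyGetD l 1 ' ') = true)
      ∧ PySem.Chars.isIn ['C'] l = true then
    let c := PySem.Chars.find l ['C']
    let num := (PySem.Int.ofChars? (PySem.List.slice l (some (c + 1)) none)).getD 0
    decodeB (num.toNat + 1) num ++ PySem.List.slice l (some 1) (some c)
  else
    let d := findSplitB l 0
    let col := (PySem.List.slice l none (some (↑d))).foldl
      (fun acc ch => acc * 26 + ((ch.toNat : Int) - 65) + 1) 0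
    'R' :: PySem.List.slice l (some (↑d)) none ++ 'C' :: PySem.Int.toChars col

def convert_alt (cell_name : String) : String :=
  String.ofList (convertCharsB cell_name.toList)

-- ===== PRECONDITION & SPEC =====

-- Pre_convert excludes exactly the inputs where the Python A raises (and B raises there too):
-- the empty string, all-alphabetic strings (the division scan runs past the end: IndexError),
-- a leading 'R' with no second character (IndexError), and RxCy-shaped strings whose part
-- after the first 'C' is not int()-parseable (ValueError).
def Pre_convert (cell_name : String) : Prop :=
  let l := cell_name.toList
  if PySem.List.pyGetD l 0 ' ' = 'R' then
    2 ≤ l.length ∧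
      (if ¬ (PySem.Chars.isalpha (PySem.List.pyGetD l 1 ' ') = true)
          ∧ PySem.Chars.isIn ['C'] l = true then
        (PySem.Int.ofChars? (l.drop ((PySem.Chars.find l ['C']).toNat + 1))).isSome = true
      else ¬ (l.all PySem.Chars.isalpha = true))
  else ¬ (l.all PySem.Chars.isalpha = true)

instance (cell_name : String) : Decidable (Pre_convert cell_name) := by
  unfold Pre_convert; infer_instance

def pvWitness_convert : String := "BC23"

def Spec_convert (cell_name : String) (out : String) : Prop := out = convert_alt cell_name
instance (cell_name : String) (out : String) : Decidable (Spec_convert cell_name out) := by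
  unfold Spec_convert; infer_instance

-- ===== CLAIM (what is proved, stated in full; the proofs are below) =====

def Claim_equal_convert : Prop :=
  ∀ (cell_name : String), Dom_convert cell_name → Pre_convert cell_name →
    Spec_convert cell_name (convert cell_name)

-- ===== LEMMAS AND PROOFS =====

-- alphaPrefixLenB: proof-side characterisation of the prefix length
def alphaPrefixLenB : List Char → Nat
  | [] => 0
  | c :: t => if PySem.Chars.isalpha c then alphaPrefixLenB t + 1 else 0

-- ssum a L = 26^a + 26^(a+1) + … + 26^(a+L-1)
def ssum : Nat → Nat → Int
  | _, 0 => 0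
  | a, L + 1 => 26 ^ a + ssum (a + 1) L

theorem ssum_nonneg (a L : Nat) : 0 ≤ ssum a L := by
  induction L generalizing a with
  | zero => simp [ssum]
  | succ L ih =>
    have := ih (a + 1)
    have : (0:Int) ≤ 26 ^ a := by positivity
    simp only [ssum]; omega

theorem ssum_succ_right (a L : Nat) : ssum a (L + 1) = ssum a L + 26 ^ (a + L) := by
  induction L generalizing a with
  | zero => simp [ssum]
  | succ L ih =>
    have h := ih (a + 1)
    simp only [ssum] at h ⊢
    have he : a + 1 + L = a + (L + 1) := by omega
    rw [he] at h
    omega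

theorem ssum_shift (a L : Nat) : ssum (a + 1) L = 26 * ssum a L := by
  induction L generalizing a with
  | zero => simp [ssum]
  | succ L ih =>
    simp only [ssum, ih (a + 1)]
    rw [pow_succ]
    have := ih a
    omega

theorem le_ssum (a L : Nat) : (L : Int) ≤ ssum a L := by
  induction L generalizing a with
  | zero => simp [ssum]
  | succ L ih =>
    have h1 : (1:Int) ≤ 26 ^ a := one_le_pow₀ (by norm_num)
    have := ih (a + 1)
    simp only [ssum]; push_cast; omega

theorem exists_ssum_bracket (num : Int) (h1 : 1 ≤ num) :
    ∃ L, ssum 1 L < num ∧ num ≤ ssum 1 (L + 1) := by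
  have hex : ∃ L, num ≤ ssum 1 (L + 1) := by
    refine ⟨num.toNat, ?_⟩
    have := le_ssum 1 (num.toNat + 1)
    push_cast at this
    omega
  classical
  refine ⟨Nat.find hex, ?_, Nat.find_spec hex⟩
  rcases Nat.eq_zero_or_pos (Nat.find hex) with h0 | h0
  · rw [h0]; simp [ssum]; omega
  · have := Nat.find_min hex (m := Nat.find hex - 1) (by omega)
    have heq : Nat.find hex - 1 + 1 = Nat.find hex := by omega
    rw [heq] at this
    omega

theorem phase1_eq : ∀ (L a : Nat) (num : Int) (fuel : Nat), ssum a L < num →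
    num ≤ ssum a (L + 1) → L < fuel →
    numToLetPhase1 fuel num a = (num - ssum a L, a + L) := by
  intro L
  induction L with
  | zero =>
    intro a num fuel h1 h2 hf
    obtain ⟨f, rfl⟩ : ∃ f, fuel = f + 1 := ⟨fuel - 1, by omega⟩
    rw [numToLetPhase1]
    simp only [ssum] at h1 h2 ⊢
    rw [if_neg (by omega)]
    simp
  | succ L ih =>
    intro a num fuel h1 h2 hf
    obtain ⟨f, rfl⟩ : ∃ f, fuel = f + 1 := ⟨fuel - 1, by omega⟩
    have hpos : (0:Int) ≤ ssum (a + 1) L := ssum_nonneg _ _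
    have hgt : num > 26 ^ a := by simp only [ssum] at h1; omega
    rw [numToLetPhase1, if_pos hgt]
    have hl : ssum (a + 1) L < num - 26 ^ a := by simp only [ssum] at h1; omega
    have hr : num - 26 ^ a ≤ ssum (a + 1) (L + 1) := by
      have : ssum a (L + 1 + 1) = 26 ^ a + ssum (a + 1) (L + 1) := by simp only [ssum]
      omega
    rw [ih (a + 1) (num - 26 ^ a) f hl hr (by omega)]
    have : num - 26 ^ a - ssum (a + 1) L = num - ssum a (L + 1) := by
      simp only [ssum]; omega
    rw [this]
    congr 1
    omega

theorem phase2_append (k : Nat) : ∀ (num : Int) (acc : List Char),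
    numToLetPhase2 k num acc = numToLetPhase2 k num [] ++ acc := by
  induction k with
  | zero => intro num acc; simp [numToLetPhase2]
  | succ k ih =>
    intro num acc
    simp only [numToLetPhase2]
    rw [ih, ih (PySem.Int.floordiv num 26) [_]]
    simp

theorem phase2_succ (k : Nat) (m : Int) :
    numToLetPhase2 (k + 1) m [] =
      numToLetPhase2 k (PySem.Int.floordiv m 26) [] ++
        [Char.ofNat (PySem.Int.mod m 26 + 65).toNat] := by
  simp only [numToLetPhase2]
  rw [phase2_append]

-- the heart of the file: A's two-phase num_to_let equals B's do-while decode, on every int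
theorem decode_eq_aux : ∀ (n : Nat) (num : Int) (fuel : Nat), num.toNat ≤ n →
    num.toNat < fuel → numToLetCore num = decodeB fuel num := by
  intro n
  induction n with
  | zero =>
    intro num fuel hn hfuel
    obtain ⟨f, rfl⟩ : ∃ f, fuel = f + 1 := ⟨fuel - 1, by omega⟩
    have h26 : num ≤ 26 := by omega
    rw [numToLetCore, numToLetPhase1, if_neg (by norm_num; omega)]
    rw [decodeB]
    rw [if_neg ?_]
    · simp [numToLetPhase2]
    · rw [PySem.Int.floordiv_eq_ediv_of_pos (by norm_num)]
      have : (num - 1) / 26 < 1 := Int.ediv_lt_of_lt_mul (by norm_num) (by omega)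
      omega
  | succ n ih =>
    intro num fuel hn hfuel
    obtain ⟨f, rfl⟩ : ∃ f, fuel = f + 1 := ⟨fuel - 1, by omega⟩
    by_cases h26 : num ≤ 26
    · rw [numToLetCore, numToLetPhase1, if_neg (by norm_num; omega)]
      rw [decodeB]
      rw [if_neg ?_]
      · simp [numToLetPhase2]
      · rw [PySem.Int.floordiv_eq_ediv_of_pos (by norm_num)]
        have : (num - 1) / 26 < 1 := Int.ediv_lt_of_lt_mul (by norm_num) (by omega)
        omega
    · -- num ≥ 27
      rw [not_le] at h26
      set q := PySem.Int.floordiv (num - 1) 26 with hq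
      have hqe : q = (num - 1) / 26 := by
        rw [hq, PySem.Int.floordiv_eq_ediv_of_pos (by norm_num)]
      have hq1 : 1 ≤ q := by
        rw [hqe]; exact Int.le_ediv_iff_mul_le (by norm_num) |>.2 (by omega)
      have hqlt : q < num := by
        rw [hqe]
        have := Int.ediv_le_self (num - 1) (by omega : (0:Int) ≤ num - 1)
        omega
      obtain ⟨L, hL1, hL2⟩ := exists_ssum_bracket num (by omega)
      obtain ⟨K, rfl⟩ : ∃ K, L = K + 1 := by
        cases L with
        | zero =>
          exfalso
          have : ssum 1 (0 + 1) = 26 := by norm_num [ssum]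
          omega
        | succ K => exact ⟨K, rfl⟩
      set r := num - ssum 1 (K + 1) with hr
      have hLnum : ((K : Int) + 1) < num := by
        have := le_ssum 1 (K + 1)
        push_cast at this
        omega
      have hph : numToLetPhase1 (num.toNat + 1) num 1 = (r, 1 + (K + 1)) :=
        phase1_eq (K + 1) 1 num (num.toNat + 1) hL1 hL2 (by omega)
      -- Arithmetic bridge for q
      have hshift : ssum 1 (K + 1) = 26 * ssum 0 (K + 1) := ssum_shift 0 (K + 1)
      have hzero : ssum 0 (K + 1) = 1 + ssum 1 K := by simp [ssum]
      have hqsum : q = PySem.Int.floordiv (r - 1) 26 + 1 + ssum 1 K := by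
        rw [hqe, PySem.Int.floordiv_eq_ediv_of_pos (by norm_num)]
        have : num - 1 = (r - 1) + (1 + ssum 1 K) * 26 := by rw [hr]; omega
        rw [this, Int.add_mul_ediv_right _ _ (by norm_num : (26:Int) ≠ 0)]
        omega
      have hrpos : 1 ≤ r := by omega
      have hrub : r ≤ 26 ^ (K + 2) := by
        have := ssum_succ_right 1 (K + 1)
        have he : 1 + (K + 1) = K + 2 := by omega
        rw [he] at this
        omega
      have hd0 : (0:Int) ≤ PySem.Int.floordiv (r - 1) 26 := by
        rw [PySem.Int.floordiv_eq_ediv_of_pos (by norm_num)]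
        exact Int.ediv_nonneg (by omega) (by norm_num)
      have hdub : PySem.Int.floordiv (r - 1) 26 < 26 ^ (K + 1) := by
        rw [PySem.Int.floordiv_eq_ediv_of_pos (by norm_num)]
        apply Int.ediv_lt_of_lt_mul (by norm_num)
        have : (26:Int) ^ (K + 1) * 26 = 26 ^ (K + 2) := by ring
        omega
      have hqL1 : ssum 1 K < q := by omega
      have hqL2 : q ≤ ssum 1 (K + 1) := by
        have := ssum_succ_right 1 K
        have he : 1 + K = K + 1 := by omega
        rw [he] at this
        omega
      have hKq : (K : Int) < q := by
        have := le_ssum 1 K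
        omega
      have hphq : numToLetPhase1 (q.toNat + 1) q 1 = (q - ssum 1 K, 1 + K) :=
        phase1_eq K 1 q (q.toNat + 1) hqL1 hqL2 (by omega)
      have hmod : PySem.Int.mod (r - 1) 26 = PySem.Int.mod (num - 1) 26 := by
        rw [PySem.Int.mod_eq_emod_of_pos (by norm_num), PySem.Int.mod_eq_emod_of_pos (by norm_num)]
        have : num - 1 = (r - 1) + 26 * (1 + ssum 1 K) := by rw [hr]; omega
        rw [this, Int.add_mul_emod_self_left]
      -- assemble
      have hA : numToLetCore num =
          numToLetPhase2 (K + 1) (PySem.Int.floordiv (r - 1) 26) [] ++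
            [Char.ofNat (PySem.Int.mod (num - 1) 26 + 65).toNat] := by
        rw [numToLetCore, hph]
        have he : 1 + (K + 1) = (K + 1) + 1 := by omega
        simp only [he]
        rw [phase2_succ, hmod]
      have hAq : numToLetCore q = numToLetPhase2 (K + 1) (PySem.Int.floordiv (r - 1) 26) [] := by
        rw [numToLetCore, hphq]
        have he : 1 + K = K + 1 := by omega
        simp only [he]
        congr 1
        omega
      have hB : decodeB (f + 1) num
          = decodeB f q ++ [Char.ofNat (PySem.Int.mod (num - 1) 26 + 65).toNat] := by
        rw [decodeB]
        simp only [← hq]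
        rw [if_pos (by omega)]
      rw [hA, hB, ← hAq]
      congr 1
      exact ih q f (by omega) (by omega)

theorem decode_eq (num : Int) : numToLetCore num = decodeB (num.toNat + 1) num :=
  decode_eq_aux num.toNat num (num.toNat + 1) le_rfl (by omega)

-- the element-copy loop 'for i in range(a, b): out += l[i]' is a slice
theorem map_range_getD (l : List Char) (a m : Nat) (h : a + m ≤ l.length) :
    (List.range m).map (fun k => l.getD (a + k) ' ') = (l.drop a).take m := by
  apply List.ext_getElem
  · simp; omega
  · intro i h1 h2
    simp only [List.getElem_map, List.getElem_range, List.getElem_take, List.getElem_drop]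
    rw [List.getD_eq_getElem l ' ' (by simp at h1; omega)]

theorem loopSlice (l : List Char) (a b : Nat) (hab : a ≤ b) (hb : b ≤ l.length) :
    (PySem.List.pyRange (↑a) (↑b) 1).foldl
      (fun acc i => acc ++ [PySem.List.pyGetD l i ' ']) [] = (l.drop a).take (b - a) := by
  rw [PySem.List.foldl_append_singleton_eq_map, PySem.List.pyRange_one, List.map_map]
  have h1 : ((b:Int) - (a:Int)).toNat = b - a := by omega
  rw [h1, List.nil_append]
  have h2 : ∀ k : Nat, ((fun i => PySem.List.pyGetD l i ' ') ∘ fun k : Nat => (a:Int) + ↑k) k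
      = l.getD (a + k) ' ' := by
    intro k
    simp only [Function.comp]
    have : (a:Int) + (k:Int) = ((a + k : Nat) : Int) := by push_cast; ring
    rw [this, PySem.List.pyGetD_natCast]
  calc (List.range (b - a)).map ((fun i => PySem.List.pyGetD l i ' ') ∘ fun k : Nat => (a:Int) + ↑k)
      = (List.range (b - a)).map (fun k => l.getD (a + k) ' ') := List.map_congr_left (fun k _ => h2 k)
    _ = (l.drop a).take (b - a) := map_range_getD l a (b - a) (by omega)

-- 25 * (1 + 26 + … + 26^(d-1)) = 26^d - 1
theorem ssum0_identity (d : Nat) : 25 * ssum 0 d = 26 ^ d - 1 := by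
  induction d with
  | zero => simp [ssum]
  | succ d ih =>
    have h1 : ssum 0 (d + 1) = ssum 0 d + 26 ^ d := by
      have := ssum_succ_right 0 d
      simpa using this
    rw [h1, pow_succ]
    omega

-- Horner accumulation = geometric base + power series
theorem horner_spec (t : List Char) :
    t.foldl (fun acc c => acc * 26 + ((c.toNat : Int) - 65) + 1) 0 =
      ssum 0 t.length +
        ((List.range t.length).map
          (fun i => ((t.getD i ' ').toNat - 65 : Int) * 26 ^ (t.length - 1 - i))).sum := by
  induction t using List.reverseRecOn with
  | nil => simp [ssum]
  | append_singleton t c ih =>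
    rw [List.foldl_append]
    simp only [List.foldl_cons, List.foldl_nil]
    rw [ih]
    have hlen : (t ++ [c]).length = t.length + 1 := by simp
    rw [hlen, List.range_succ, List.map_append, List.sum_append]
    have hgetr : (t ++ [c]).getD t.length ' ' = c := by
      simp [List.getD_eq_getElem?_getD]
    have hlast : (List.map (fun i => (((t ++ [c]).getD i ' ').toNat - 65 : Int) *
        26 ^ (t.length + 1 - 1 - i)) [t.length]).sum = ((c.toNat : Int) - 65) := by
      simp only [List.map_cons, List.map_nil, List.sum_cons, List.sum_nil, hgetr]
      simp
    rw [hlast]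
    have hmain : (List.range t.length).map (fun i => (((t ++ [c]).getD i ' ').toNat - 65 : Int) *
        26 ^ (t.length + 1 - 1 - i)) =
        (List.range t.length).map
          (fun i => (((t.getD i ' ').toNat - 65 : Int) * 26 ^ (t.length - 1 - i)) * 26) := by
      apply List.map_congr_left
      intro i hi
      have hi' : i < t.length := List.mem_range.1 hi
      have hg : (t ++ [c]).getD i ' ' = t.getD i ' ' := by
        simp [List.getD_eq_getElem?_getD, List.getElem?_append_left hi']
      have he : t.length + 1 - 1 - i = (t.length - 1 - i) + 1 := by omega
      rw [hg, he, pow_succ]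
      ring
    rw [hmain, List.sum_map_mul_right]
    have hss : ssum 0 (t.length + 1) = 1 + 26 * ssum 0 t.length := by
      have h1 : ssum 0 (t.length + 1) = 26 ^ 0 + ssum 1 t.length := by simp only [ssum]
      rw [h1, ssum_shift 0 t.length]
      norm_num
    rw [hss]
    ring

-- findSplitA finds the alphabetic prefix length
theorem findSplit_eq : ∀ (n : Nat) (l : List Char) (d fuel : Nat), l.length - d ≤ n →
    ¬ ((l.drop d).all PySem.Chars.isalpha = true) → l.length - d < fuel →
    findSplitA fuel l d = d + alphaPrefixLenB (l.drop d) := by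
  intro n
  induction n with
  | zero =>
    intro l d fuel hn hall hfuel
    exfalso
    rw [List.drop_eq_nil_of_le (by omega)] at hall
    simp at hall
  | succ n ih =>
    intro l d fuel hn hall hfuel
    obtain ⟨f, rfl⟩ : ∃ f, fuel = f + 1 := ⟨fuel - 1, by omega⟩
    by_cases hd : d < l.length
    · have hdrop : l.drop d = l[d] :: l.drop (d + 1) := List.drop_eq_getElem_cons hd
      rw [findSplitA, dif_pos hd]
      by_cases halpha : PySem.Chars.isalpha l[d]
      · rw [if_pos halpha]
        have hall' : ¬ ((l.drop (d + 1)).all PySem.Chars.isalpha = true) := by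
          intro h
          apply hall
          rw [hdrop, List.all_cons, halpha, h]
          rfl
        rw [ih l (d + 1) f (by omega) hall' (by omega), hdrop]
        simp only [alphaPrefixLenB, if_pos halpha]
        omega
      · rw [if_neg halpha, hdrop]
        simp only [alphaPrefixLenB, if_neg halpha]
        omega
    · exfalso
      rw [List.drop_eq_nil_of_le (by omega)] at hall
      simp at hall

theorem alphaPrefixLenB_le (l : List Char) : alphaPrefixLenB l ≤ l.length := by
  induction l with
  | nil => simp [alphaPrefixLenB]
  | cons c t ih =>
    simp only [alphaPrefixLenB]
    split
    · simp; omega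
    · simp

-- findCA finds the first 'C' when told where it is
theorem findC_eq : ∀ (n : Nat) (l : List Char) (i j0 fuel : Nat), j0 - i ≤ n → i ≤ j0 →
    j0 - i < fuel → l[j0]? = some 'C' → (∀ j, j < j0 → l[j]? ≠ some 'C') →
    findCA fuel l i = j0 := by
  intro n
  induction n with
  | zero =>
    intro l i j0 fuel hn hij hfuel hj0 _
    obtain ⟨f, rfl⟩ : ∃ f, fuel = f + 1 := ⟨fuel - 1, by omega⟩
    obtain ⟨hlt, heq⟩ := List.getElem?_eq_some_iff.1 hj0
    have hii : i = j0 := by omega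
    subst hii
    rw [findCA, dif_pos hlt, if_neg (not_not_intro heq)]
  | succ n ih =>
    intro l i j0 fuel hn hij hfuel hj0 hmin
    obtain ⟨f, rfl⟩ : ∃ f, fuel = f + 1 := ⟨fuel - 1, by omega⟩
    obtain ⟨hlt, heq⟩ := List.getElem?_eq_some_iff.1 hj0
    by_cases hii : i = j0
    · subst hii
      rw [findCA, dif_pos hlt, if_neg (not_not_intro heq)]
    · have hilt : i < j0 := by omega
      have hi : i < l.length := by omega
      have hne : l[i] ≠ 'C' := by
        intro hc
        exact hmin i hilt (List.getElem?_eq_some_iff.2 ⟨hi, hc⟩)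
      rw [findCA, dif_pos hi, if_pos hne]
      exact ih l (i + 1) j0 f (by omega) (by omega) (by omega) hj0 hmin

theorem singleton_prefix_iff (c : Char) (t : List Char) : [c] <+: t ↔ t[0]? = some c := by
  cases t with
  | nil => simp
  | cons x xs => simp [List.cons_prefix_cons, eq_comm]

theorem pyGetD_one_eq (l : List Char) (h : 1 < l.length) :
    PySem.List.pyGetD l 1 ' ' = l[1] := by
  rw [PySem.List.pyGetD_ofNat', List.getD_eq_getElem l ' ' h]

theorem pyGetD_zero_eq (l : List Char) (h : 0 < l.length) :
    PySem.List.pyGetD l 0 ' ' = l[0] := by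
  rw [PySem.List.pyGetD_zero, List.getD_eq_getElem l ' ' h]

-- the A1->RxCy column: Horner over the prefix = A's base + power series (+1)
theorem colA_closed (l : List Char) (d : Nat) (hdle : d ≤ l.length) :
    (l.take d).foldl (fun acc ch => acc * 26 + ((ch.toNat : Int) - 65) + 1) 0 =
      ssum 0 d +
        ((List.range d).map
          (fun i => ((l.getD i ' ').toNat - 65 : Int) * 26 ^ (d - 1 - i))).sum := by
  rw [horner_spec]
  have hlen : (l.take d).length = d := by rw [List.length_take]; omega
  simp only [hlen]
  congr 1
  congr 1
  apply List.map_congr_left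
  intro i hi
  have hi' : i < d := List.mem_range.1 hi
  have hg : (l.take d).getD i ' ' = l.getD i ' ' := by
    rw [List.getD_eq_getElem?_getD, List.getD_eq_getElem?_getD, List.getElem?_take, if_pos hi']
  rw [hg]

-- main chars-level equivalence
theorem main_chars (l : List Char) :
    (if PySem.List.pyGetD l 0 ' ' = 'R' then
      2 ≤ l.length ∧
        (if ¬ (PySem.Chars.isalpha (PySem.List.pyGetD l 1 ' ') = true)
            ∧ PySem.Chars.isIn ['C'] l = true then
          (PySem.Int.ofChars? (l.drop ((PySem.Chars.find l ['C']).toNat + 1))).isSome = true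
        else ¬ (l.all PySem.Chars.isalpha = true))
    else ¬ (l.all PySem.Chars.isalpha = true)) →
    convertCharsA l = convertCharsB l := by
  intro hpre
  by_cases hg : PySem.List.pyGetD l 0 ' ' = 'R'
      ∧ ¬ (PySem.Chars.isalpha (PySem.List.pyGetD l 1 ' ') = true)
      ∧ PySem.Chars.isIn ['C'] l = true
  · -- R1C1 -> A1 branch
    obtain ⟨hR, hA1, hC⟩ := hg
    rw [if_pos hR] at hpre
    obtain ⟨hlen2, hinner⟩ := hpre
    rw [if_pos ⟨hA1, hC⟩] at hinner
    have hlpos : 0 < l.length := by omega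
    -- locate the first 'C'
    have hinf : ['C'] <:+: l := (PySem.Chars.isIn_iff_infix ['C'] l).1 hC
    have hne : PySem.Chars.find l ['C'] ≠ -1 := (PySem.Chars.find_ne_neg_one_iff l ['C']).2 hinf
    have hf0 : 0 ≤ PySem.Chars.find l ['C'] := by
      have := PySem.Chars.neg_one_le_find l ['C']
      omega
    obtain ⟨j0, hfj⟩ : ∃ j0 : Nat, PySem.Chars.find l ['C'] = (j0 : Int) :=
      ⟨_, (Int.toNat_of_nonneg hf0).symm⟩
    have hff : PySem.Chars.findFrom l ['C'] ((0 : Nat) : Int) = PySem.Chars.find l ['C'] := by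
      rw [Nat.cast_zero, PySem.Chars.findFrom_zero]
    have hspec := PySem.Chars.findFrom_natCast_spec l ['C'] 0 (Nat.zero_le _)
      (by rw [hff]; exact hne)
    rw [hff, hfj] at hspec
    obtain ⟨-, hpref, hmin⟩ := hspec
    rw [Int.toNat_natCast] at hpref hmin
    have hCj : l[j0]? = some 'C' := by
      have := (singleton_prefix_iff 'C' (l.drop j0)).1 hpref
      simpa [List.getElem?_drop] using this
    have hminC : ∀ j, j < j0 → l[j]? ≠ some 'C' := by
      intro j hj hsome
      exact hmin j (Nat.zero_le _) hj
        ((singleton_prefix_iff 'C' (l.drop j)).2 (by simpa [List.getElem?_drop] using hsome))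
    have hj0len : j0 < l.length := (List.getElem?_eq_some_iff.1 hCj).1
    have hj02 : 2 ≤ j0 := by
      rcases Nat.lt_or_ge j0 2 with h | h
      · exfalso
        interval_cases j0
        · have h0 : l[0] = 'R' := by rw [← pyGetD_zero_eq l hlpos]; exact hR
          have := (List.getElem?_eq_some_iff.1 hCj).2
          rw [h0] at this
          exact absurd this (by decide)
        · have h1 : l[1] = 'C' := (List.getElem?_eq_some_iff.1 hCj).2
          apply hA1
          rw [pyGetD_one_eq l (by omega), h1]
          decide
      · exact h
    have hcp : findCA (l.length + 1) l 2 = j0 :=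
      findC_eq j0 l 2 j0 (l.length + 1) (by omega) hj02 (by omega) hCj hminC
    -- the A fold-copies and B slices are the same sublists
    have hcolchars : (PySem.List.pyRange (↑(j0 + 1)) (↑l.length) 1).foldl
        (fun acc i => acc ++ [PySem.List.pyGetD l i ' ']) [] = l.drop (j0 + 1) := by
      rw [loopSlice l (j0 + 1) l.length (by omega) le_rfl]
      exact List.take_of_length_le (by simp)
    have hrowA := loopSlice l 1 j0 (by omega) (by omega)
    rw [Nat.cast_one] at hrowA
    have hsliceB := PySem.List.slice_natCast l 1 j0
    rw [Nat.cast_one] at hsliceB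
    have hfrom : PySem.List.slice l (some ((j0 : Int) + 1)) none = l.drop (j0 + 1) := by
      have : ((j0 : Int) + 1) = ((j0 + 1 : Nat) : Int) := by push_cast; ring
      rw [this, PySem.List.slice_from_natCast]
    -- the shared column number
    rw [hfj, Int.toNat_natCast] at hinner
    obtain ⟨num, hnum⟩ := Option.isSome_iff_exists.1 hinner
    -- assemble
    have htc : typeCheckA l = 2 := by
      unfold typeCheckA
      rw [if_neg (not_not_intro hR), if_neg hA1, if_neg (not_not_intro hC)]
    simp only [convertCharsA, convertCharsB]
    rw [if_neg (by rw [htc]; decide), if_pos ⟨hR, hA1, hC⟩]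
    rw [hcp, hfj, hcolchars, hrowA, hsliceB, hfrom, hnum]
    simp only [numToLetA, hnum, Option.getD_some]
    rw [decode_eq]
  · -- A1 -> R1C1 branch
    have hnal : ¬ (l.all PySem.Chars.isalpha = true) := by
      by_cases hR : PySem.List.pyGetD l 0 ' ' = 'R'
      · rw [if_pos hR] at hpre
        obtain ⟨hlen2, hinner⟩ := hpre
        by_cases hcond : ¬ (PySem.Chars.isalpha (PySem.List.pyGetD l 1 ' ') = true)
            ∧ PySem.Chars.isIn ['C'] l = true
        · exact absurd ⟨hR, hcond.1, hcond.2⟩ hg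
        · rw [if_neg hcond] at hinner
          exact hinner
      · rw [if_neg hR] at hpre
        exact hpre
    have htc : typeCheckA l = 1 := by
      unfold typeCheckA
      by_cases h1 : PySem.List.pyGetD l 0 ' ' = 'R'
      · rw [if_neg (not_not_intro h1)]
        by_cases h2 : PySem.Chars.isalpha (PySem.List.pyGetD l 1 ' ') = true
        · rw [if_pos h2]
        · rw [if_neg h2]
          by_cases h3 : PySem.Chars.isIn ['C'] l = true
          · exact absurd ⟨h1, h2, h3⟩ hg
          · rw [if_pos h3]
      · rw [if_pos h1]
    have hsplit : findSplitA (l.length + 1) l 0 = alphaPrefixLenB l := by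
      have h := findSplit_eq l.length l 0 (l.length + 1) (by omega)
        (by rw [List.drop_zero]; exact hnal) (by omega)
      rw [List.drop_zero] at h
      omega
    have hsplitB : findSplitB l 0 = alphaPrefixLenB l := by
      have h2 : ∀ (t : List Char) (d : Nat), ¬ (t.all PySem.Chars.isalpha = true) →
          findSplitB t d = d + alphaPrefixLenB t := by
        intro t
        induction t with
        | nil => intro d hall; simp at hall
        | cons c tl ih =>
          intro d hall
          by_cases hc : PySem.Chars.isalpha c
          · have htl : ¬ (tl.all PySem.Chars.isalpha = true) := by
              intro hh; exact hall (by rw [List.all_cons, hc, hh]; rfl)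
            simp only [findSplitB, alphaPrefixLenB, if_pos hc, ih (d + 1) htl]
            omega
          · simp [findSplitB, alphaPrefixLenB, hc]
      exact (h2 l 0 hnal).trans (by omega)
    have hdle : alphaPrefixLenB l ≤ l.length := alphaPrefixLenB_le l
    have hrowA := loopSlice l (alphaPrefixLenB l) l.length (by omega) le_rfl
    rw [List.take_of_length_le (by simp)] at hrowA
    -- the column values agree
    have hcol : ((PySem.List.pyRange 0 (↑(alphaPrefixLenB l)) 1).foldl
        (fun acc i => acc + (((PySem.List.pyGetD l i ' ').toNat : Int) - 65)
          * 26 ^ (alphaPrefixLenB l - 1 - i.toNat))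
        (PySem.Int.floordiv (26 ^ alphaPrefixLenB l - 26) 25)) + 1
        = (l.take (alphaPrefixLenB l)).foldl
            (fun acc ch => acc * 26 + ((ch.toNat : Int) - 65) + 1) 0 := by
      rw [PySem.List.foldl_add, PySem.List.pyRange_zero_nat, List.map_map]
      rw [List.map_congr_left (g := fun k : Nat =>
          ((l.getD k ' ').toNat - 65 : Int) * 26 ^ (alphaPrefixLenB l - 1 - k))
        (fun k _ => by
          simp only [Function.comp_apply, PySem.List.pyGetD_natCast, Int.toNat_natCast])]
      rw [colA_closed l (alphaPrefixLenB l) hdle]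
      have hfd : PySem.Int.floordiv (26 ^ alphaPrefixLenB l - 26) 25
          = ssum 0 (alphaPrefixLenB l) - 1 := by
        rw [PySem.Int.floordiv_eq_ediv_of_pos (by norm_num)]
        have h25 : (26 : Int) ^ alphaPrefixLenB l - 26 = 25 * (ssum 0 (alphaPrefixLenB l) - 1) := by
          have := ssum0_identity (alphaPrefixLenB l)
          omega
        rw [h25, Int.mul_ediv_cancel_left _ (by norm_num)]
      rw [hfd]
      omega
    simp only [convertCharsA, convertCharsB]
    rw [if_pos htc, if_neg hg, hsplit, hsplitB, hrowA, PySem.List.slice_from_natCast,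
      PySem.List.slice_to_natCast, hcol]

-- ===== VERDICT (by name: the statement is the Claim_ definition above) =====

theorem convert_spec : Claim_equal_convert := by
  unfold Claim_equal_convert
  intro s _ hpre
  unfold Spec_convert convert convert_alt
  exact congrArg String.ofList (main_chars s.toList hpre)
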